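-- pv_equiv track=rewrite | github.com/jcreator35/PlayPcmWin | PlayPcmWin/WWKeyClassifier2/train/KeysCsvToSpectraTable.py | CreateKeyIdx
-- ===== SOURCE A (Python) =====
-- def CreateKeyIdx(keys):
--     idx = 0
--     keyToIdx = {}
--     idxToKey = {}
--     for k in keys:
--         if k in keyToIdx:
--             pass
--         else:
--             keyToIdx[k] = idx
--             idxToKey[idx] = k
--             idx = idx + 1
--     return (keyToIdx, idxToKey)
-- ===== SOURCE B (Python) =====
-- def CreateKeyIdx(keys):
--     # first-occurrence position of every distinct key: reverse sweep, earlier writes win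
--     first = {k: p for p, k in reversed(list(enumerate(keys)))}
--     # distinct keys in first-occurrence order, recovered by sorting on position
--     unique = sorted(first, key=lambda k: first[k])
--     keyToIdx = {k: i for i, k in enumerate(unique)}
--     idxToKey = {i: k for i, k in enumerate(unique)}
--     return (keyToIdx, idxToKey)
-- ===== Notes on version B (the rewrite author's own statement) =====
-- stated objective: alternative
-- what changed: Instead of A's forward loop with a membership branch and a running counter, B computes every key's first-occurrence position by a reverse sweep with unconditional overwrite, sorts the distinct keys by that position to recover first-occurrence order, and builds both dicts by enumeration.
import Mathlib
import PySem

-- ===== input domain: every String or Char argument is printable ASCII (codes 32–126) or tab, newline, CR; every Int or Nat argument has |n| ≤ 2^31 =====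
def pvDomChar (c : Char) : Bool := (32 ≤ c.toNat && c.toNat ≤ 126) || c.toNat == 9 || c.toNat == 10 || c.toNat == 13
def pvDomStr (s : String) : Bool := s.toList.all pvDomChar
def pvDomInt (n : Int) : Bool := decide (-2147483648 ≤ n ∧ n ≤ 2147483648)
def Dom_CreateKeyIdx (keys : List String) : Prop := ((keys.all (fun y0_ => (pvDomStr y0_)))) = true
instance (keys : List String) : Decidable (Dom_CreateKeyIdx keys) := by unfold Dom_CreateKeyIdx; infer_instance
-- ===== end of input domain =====

-- B replaces A's forward loop (membership branch + running counter) by a reverse sweep that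
-- records each key's first-occurrence position, a sort of the distinct keys by that position,
-- and two enumerations (objective: alternative).

-- ===== PORT A =====
-- one loop step of A: skip a seen key, else record it in both dicts and bump the counter
def pvStepA (st : Int × PySem.Dict String Int × PySem.Dict Int String) (k : String) :
    Int × PySem.Dict String Int × PySem.Dict Int String :=
  if st.2.1.contains k then st
  else (st.1 + 1, st.2.1.insert k st.1, st.2.2.insert st.1 k)

def CreateKeyIdx (keys : List String) : (List (String × Int)) × (List (Int × String)) :=
  let fin := keys.foldl pvStepA (0, PySem.Dict.empty, PySem.Dict.empty)
  (fin.2.1.items, fin.2.2.items)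

-- ===== PORT B =====
-- first = {k: p for p, k in reversed(list(enumerate(keys)))}; unique = sorted(first, key=lambda k: first[k]);
-- first[k] never raises since the sort iterates over first's own keys, so getD's default is never used
def CreateKeyIdx_alt (keys : List String) : (List (String × Int)) × (List (Int × String)) :=
  let first : PySem.Dict String Int :=
    ((PySem.List.enumerate keys).reverse).foldl (fun d p => d.insert p.2 p.1) PySem.Dict.empty
  let unique := PySem.List.sorted first.keys (fun k => first.getD k 0) false
  let keyToIdx : PySem.Dict String Int :=
    (PySem.List.enumerate unique).foldl (fun d p => d.insert p.2 p.1) PySem.Dict.empty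
  let idxToKey : PySem.Dict Int String :=
    (PySem.List.enumerate unique).foldl (fun d p => d.insert p.1 p.2) PySem.Dict.empty
  (keyToIdx.items, idxToKey.items)

-- ===== PRECONDITION & SPEC =====
def Spec_CreateKeyIdx (keys : List String) (out : (List (String × Int)) × (List (Int × String))) : Prop := out = CreateKeyIdx_alt keys
instance (keys : List String) (out : (List (String × Int)) × (List (Int × String))) : Decidable (Spec_CreateKeyIdx keys out) := by unfold Spec_CreateKeyIdx; infer_instance

-- ===== CLAIM (what is proved, stated in full; the proofs are below) =====
def Claim_equal_CreateKeyIdx : Prop := ∀ (keys : List String), Dom_CreateKeyIdx keys → Spec_CreateKeyIdx keys (CreateKeyIdx keys)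

-- ===== LEMMAS AND PROOFS =====

-- ---------- A's side: the loop state after seeing the distinct keys u ----------
def pvStOf (u : List String) : Int × PySem.Dict String Int × PySem.Dict Int String :=
  ((u.length : Int),
   PySem.Dict.mk ((PySem.List.enumerate u).map (fun p => (p.2, p.1))),
   PySem.Dict.mk (PySem.List.enumerate u))

theorem pvInsert_not_contains {κ ν : Type} [BEq κ] (d : PySem.Dict κ ν) (k : κ) (v : ν)
    (h : d.contains k = false) : d.insert k v = PySem.Dict.mk (d.items ++ [(k, v)]) := by
  simp [PySem.Dict.insert, h]

theorem pvStep_eq (u : List String) (k : String) :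
    pvStepA (pvStOf u) k = pvStOf (PySem.Set.add u k) := by
  have hkeys : (PySem.Dict.mk ((PySem.List.enumerate u).map (fun p => (p.2, p.1)))).keys = u := by
    simp [PySem.Dict.keys_mk, List.map_map]
    exact PySem.List.map_snd_enumerate u 0
  by_cases hm : k ∈ u
  · have hc : (PySem.Dict.mk ((PySem.List.enumerate u).map (fun p => (p.2, p.1)))).contains k = true := by
      rw [PySem.Dict.contains_iff_mem_keys, hkeys]; exact hm
    simp [pvStepA, pvStOf, hc, PySem.Set.add_of_mem hm]
  · have hc : (PySem.Dict.mk ((PySem.List.enumerate u).map (fun p => (p.2, p.1)))).contains k = false := by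
      rw [Bool.eq_false_iff, ne_eq, PySem.Dict.contains_iff_mem_keys, hkeys]; exact hm
    have hc2 : (PySem.Dict.mk (PySem.List.enumerate u)).contains ((u.length : Int)) = false := by
      rw [Bool.eq_false_iff, ne_eq, PySem.Dict.contains_iff_mem_keys, PySem.Dict.keys_mk]
      intro hmem
      obtain ⟨p, hp, hp1⟩ := List.mem_map.mp hmem
      obtain ⟨j, hj, rfl⟩ := (PySem.List.mem_enumerate_iff _ _ _).mp hp
      simp at hp1; omega
    have hen : PySem.List.enumerate (u ++ [k]) = PySem.List.enumerate u ++ [((u.length : Int), k)] := by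
      rw [PySem.List.enumerate_append]
      simp [PySem.List.enumerate_cons, PySem.List.enumerate_nil]
    rw [PySem.Set.add_of_not_mem hm]
    simp only [pvStepA, pvStOf, hc, Bool.false_eq_true, if_false]
    refine Prod.ext ?_ (Prod.ext ?_ ?_)
    · simp
    · simp only []
      rw [pvInsert_not_contains _ _ _ hc]
      simp [hen]
    · simp only []
      rw [pvInsert_not_contains _ _ _ hc2]
      simp [hen]

theorem pvLoop_invariant (keys : List String) : ∀ u,
    keys.foldl pvStepA (pvStOf u) = pvStOf (PySem.Set.update u keys) := by
  induction keys with
  | nil => intro u; simp [PySem.Set.update]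
  | cons k rest ih =>
      intro u
      rw [List.foldl_cons, pvStep_eq, PySem.Set.update_cons]
      exact ih _

-- A's result is the enumerated list of distinct keys (and its swap)
theorem pvA_eq (keys : List String) :
    CreateKeyIdx keys =
      ((PySem.List.enumerate (PySem.Set.ofList keys)).map (fun p => (p.2, p.1)),
       PySem.List.enumerate (PySem.Set.ofList keys)) := by
  unfold CreateKeyIdx
  have h0 : ((0 : Int), PySem.Dict.empty, PySem.Dict.empty) = pvStOf [] := by
    simp [pvStOf, PySem.Dict.empty, PySem.List.enumerate_nil]
  rw [h0, pvLoop_invariant keys [], PySem.Set.update_nil_left]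
  simp [pvStOf]

-- ---------- first-occurrence positions ----------
def pvFirstIdx (keys : List String) (k : String) : Nat :=
  (PySem.List.index? keys k).getD 0

-- the dedup prefix before k's first occurrence, followed by k, is a prefix of the full dedup list
theorem pvRank_prefix (keys : List String) (k : String) (i : Nat)
    (hi : PySem.List.index? keys k = some i) :
    ∃ t, PySem.Set.ofList keys =
      PySem.Set.ofList (keys.take i) ++ k :: t := by
  obtain ⟨hik, hget, hbefore⟩ := PySem.List.getElem_of_index?_eq_some hi
  have hknotin : k ∉ keys.take i := by
    intro hmem
    obtain ⟨j, hj, hjk⟩ := List.mem_iff_getElem.mp hmem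
    rw [List.length_take] at hj
    exact hbefore j (by omega) (by rw [← hjk]; rw [List.getElem_take])
  have hsplit : keys = keys.take i ++ k :: (keys.drop (i + 1)) := by
    conv_lhs => rw [← List.take_append_drop i keys]
    congr 1
    rw [List.drop_eq_getElem_cons hik, hget]
  have hofl : PySem.Set.ofList keys =
      PySem.Set.update (PySem.Set.ofList (keys.take i)) (k :: keys.drop (i + 1)) := by
    conv_lhs => rw [hsplit]
    exact PySem.Set.ofList_append _ _
  rw [hofl, PySem.Set.update_eq_append_filter]
  have hkfresh : PySem.Set.contains (PySem.Set.ofList (keys.take i)) k = false := by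
    simp [PySem.Set.contains]
    intro hmem
    exact hknotin hmem
  have hhead : ∃ t', PySem.Set.ofList (k :: keys.drop (i + 1)) = k :: t' := by
    rw [← PySem.Set.update_nil_left, PySem.Set.update_cons]
    have : PySem.Set.add ([] : List String) k = [k] := by
      simp [PySem.Set.add, PySem.Set.contains]
    rw [this, PySem.Set.update_eq_append_filter]
    exact ⟨_, rfl⟩
  obtain ⟨t', ht'⟩ := hhead
  rw [ht']
  refine ⟨List.filter (fun y => !(PySem.Set.ofList (List.take i keys)).contains y) t', ?_⟩
  rw [List.filter_cons]
  simp [hknotin]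

-- the position of u[j] in u (u = ofList keys) is the number of distinct keys before its first occurrence
theorem pvRank_getElem (keys : List String) (j : Nat)
    (hj : j < (PySem.Set.ofList keys).length) :
    (PySem.Set.ofList (keys.take (pvFirstIdx keys ((PySem.Set.ofList keys)[j])))).length = j := by
  have hmemu : (PySem.Set.ofList keys)[j] ∈ PySem.Set.ofList keys := List.getElem_mem hj
  have hmem : (PySem.Set.ofList keys)[j] ∈ keys := (PySem.Set.mem_ofList _ _).mp hmemu
  have hsome : (PySem.List.index? keys ((PySem.Set.ofList keys)[j])).isSome := by
    rw [PySem.List.index?_isSome_iff]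
    exact hmem
  obtain ⟨i, hi⟩ := Option.isSome_iff_exists.mp hsome
  obtain ⟨t, ht⟩ := pvRank_prefix keys ((PySem.Set.ofList keys)[j]) i hi
  have hgetlen : (PySem.Set.ofList (keys.take i)).length < (PySem.Set.ofList keys).length := by
    conv_rhs => rw [ht]
    simp
  have heq : (PySem.Set.ofList keys)[(PySem.Set.ofList (keys.take i)).length]'hgetlen =
      (PySem.Set.ofList keys)[j] := by
    rw [List.getElem_of_eq ht]
    rw [List.getElem_append_right (by omega)]
    simp
  have hlen : (PySem.Set.ofList (keys.take i)).length = j :=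
    (List.Nodup.getElem_inj_iff (PySem.Set.nodup_ofList keys)).mp heq
  rw [pvFirstIdx, hi, Option.getD_some]
  exact hlen

-- dedup length is monotone along prefixes
theorem pvOfList_take_mono (l : List String) (a b : Nat) (hab : a ≤ b) :
    (PySem.Set.ofList (l.take a)).length ≤ (PySem.Set.ofList (l.take b)).length := by
  have hsplit : l.take b = l.take a ++ (l.take b).drop a := by
    conv_lhs => rw [← List.take_append_drop a (l.take b)]
    rw [List.take_take, Nat.min_eq_left hab]
  rw [hsplit, PySem.Set.ofList_append, PySem.Set.update_eq_append_filter]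
  simp

-- first-occurrence positions are strictly increasing along the dedup list
theorem pvPairwise_firstIdx (keys : List String) :
    (PySem.Set.ofList keys).Pairwise
      (fun a b => ((pvFirstIdx keys a : Int)) < ((pvFirstIdx keys b : Int))) := by
  rw [List.pairwise_iff_getElem]
  intro i j hi hj hij
  have hri := pvRank_getElem keys i hi
  have hrj := pvRank_getElem keys j hj
  have : ¬ (pvFirstIdx keys ((PySem.Set.ofList keys)[j]) ≤
      pvFirstIdx keys ((PySem.Set.ofList keys)[i])) := by
    intro hle
    have := pvOfList_take_mono keys _ _ hle
    omega
  have := Nat.lt_of_not_le this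
  exact_mod_cast this
-- ---------- B's first dict: get? is the first-occurrence position ----------

-- last-write-wins characterisation of an insert loop
theorem pvGet?_foldl_insert {κ ν α : Type} [BEq κ] [LawfulBEq κ] [DecidableEq κ]
    (ps : List α) (kf : α → κ) (vf : α → ν) (d : PySem.Dict κ ν) (k : κ) :
    (ps.foldl (fun d p => d.insert (kf p) (vf p)) d).get? k =
      match ps.reverse.find? (fun p => kf p == k) with
      | some q => some (vf q)
      | none => d.get? k := by
  induction ps generalizing d with
  | nil => simp
  | cons a ps ih =>
      rw [List.foldl_cons, ih, List.reverse_cons, List.find?_append]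
      cases hfind : ps.reverse.find? (fun p => kf p == k) with
      | some q => simp
      | none =>
          simp only [Option.or]
          by_cases he : kf a = k
          · subst he
            simp [List.find?, PySem.Dict.get?_insert_self]
          · have hne : (kf a == k) = false := by simp [he]
            simp [List.find?, hne, PySem.Dict.get?_insert_of_ne d (vf a) (Ne.symm he)]

-- the first matching pair of an enumeration is the first occurrence
theorem pvFind?_enumerate (keys : List String) (k : String) (i : Nat) (s : Int)
    (hi : PySem.List.index? keys k = some i) :
    (PySem.List.enumerate keys s).find? (fun p => p.2 == k) = some ((s + i : Int), k) := by
  induction keys generalizing s i with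
  | nil => simp [PySem.List.index?] at hi
  | cons x xs ih =>
      rw [PySem.List.enumerate_cons]
      by_cases he : x = k
      · subst he
        rw [PySem.List.index?_cons_self] at hi
        cases hi
        simp [List.find?]
      · have hne : (x == k) = false := by simp [he]
        rw [PySem.List.index?_cons_of_ne xs he] at hi
        cases hx : PySem.List.index? xs k with
        | none => rw [hx] at hi; simp at hi
        | some i' =>
            rw [hx] at hi
            simp only [Option.map_some] at hi
            cases hi
            rw [List.find?_cons]
            simp only [hne]
            rw [ih i' (s + 1) hx]
            congr 1
            ext
            · simp; omega
            · simp

-- the port's reverse-sweep dict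
def pvFirstDict (keys : List String) : PySem.Dict String Int :=
  ((PySem.List.enumerate keys).reverse).foldl (fun d p => d.insert p.2 p.1) PySem.Dict.empty

theorem pvFirstDict_get? (keys : List String) (k : String) (hk : k ∈ keys) :
    (pvFirstDict keys).get? k = some ((pvFirstIdx keys k : Int)) := by
  have hsome : (PySem.List.index? keys k).isSome := by
    rw [PySem.List.index?_isSome_iff]; exact hk
  obtain ⟨i, hi⟩ := Option.isSome_iff_exists.mp hsome
  unfold pvFirstDict
  rw [pvGet?_foldl_insert ((PySem.List.enumerate keys).reverse) (fun p => p.2) (fun p => p.1)]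
  rw [List.reverse_reverse, pvFind?_enumerate keys k i 0 hi]
  simp only [pvFirstIdx, hi, Option.getD_some, zero_add]

theorem pvFirstDict_keys (keys : List String) :
    (pvFirstDict keys).keys = PySem.Set.ofList keys.reverse := by
  unfold pvFirstDict
  rw [PySem.Dict.keys_foldl_insert_key ((PySem.List.enumerate keys).reverse)
        (fun p => p.2) (fun d p => p.1) PySem.Dict.empty]
  have : ((PySem.List.enumerate keys).reverse).map (fun p => p.2) = keys.reverse := by
    rw [List.map_reverse, PySem.List.map_snd_enumerate]
  rw [this]
  simp [PySem.Dict.empty, PySem.Set.update_nil_left]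

-- the sort by first-occurrence position recovers the dedup order
theorem pvUnique_eq (keys : List String) :
    PySem.List.sorted (pvFirstDict keys).keys
      (fun k => (pvFirstDict keys).getD k 0) false = PySem.Set.ofList keys := by
  apply PySem.List.sorted_eq_of_perm_of_pairwise_lt
  · rw [pvFirstDict_keys]
    rw [List.perm_ext_iff_of_nodup (PySem.Set.nodup_ofList keys) (PySem.Set.nodup_ofList keys.reverse)]
    intro a
    rw [PySem.Set.mem_ofList, PySem.Set.mem_ofList, List.mem_reverse]
  · refine List.Pairwise.imp_of_mem ?_ (pvPairwise_firstIdx keys)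
    intro a b ha hb hlt
    have hga : (pvFirstDict keys).getD a 0 = ((pvFirstIdx keys a : Int)) :=
      PySem.Dict.getD_of_get?_eq_some _ 0 (pvFirstDict_get? keys a ((PySem.Set.mem_ofList _ _).mp ha))
    have hgb : (pvFirstDict keys).getD b 0 = ((pvFirstIdx keys b : Int)) :=
      PySem.Dict.getD_of_get?_eq_some _ 0 (pvFirstDict_get? keys b ((PySem.Set.mem_ofList _ _).mp hb))
    rw [hga, hgb]
    exact hlt

-- ---------- the two enumeration dicts over the (distinct) unique list ----------
theorem pvEnum_fresh_keyToIdx (u : List String) (hu : u.Nodup) :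
    ((PySem.List.enumerate u).foldl
        (fun (d : PySem.Dict String Int) p => d.insert p.2 p.1) PySem.Dict.empty).items =
      (PySem.List.enumerate u).map (fun p => (p.2, p.1)) := by
  have hfresh : ∀ a ∈ PySem.List.enumerate u,
      (PySem.Dict.empty : PySem.Dict String Int).contains a.2 = false := by
    intro a _; simp [PySem.Dict.contains_empty]
  have hnodup : ((PySem.List.enumerate u).map (fun a => a.2)).Nodup := by
    rw [PySem.List.map_snd_enumerate]
    exact hu
  have hfold := PySem.Dict.items_foldl_insert_fresh (PySem.List.enumerate u)
      (fun a => a.2) (fun a => a.1) PySem.Dict.empty hfresh hnodup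
  rw [hfold]
  simp [PySem.Dict.empty]

theorem pvEnum_fresh_idxToKey (u : List String) :
    ((PySem.List.enumerate u).foldl
        (fun (d : PySem.Dict Int String) p => d.insert p.1 p.2) PySem.Dict.empty).items =
      PySem.List.enumerate u := by
  have hfresh : ∀ a ∈ PySem.List.enumerate u,
      (PySem.Dict.empty : PySem.Dict Int String).contains a.1 = false := by
    intro a _; simp [PySem.Dict.contains_empty]
  have hnodup : ((PySem.List.enumerate u).map (fun a => a.1)).Nodup := by
    have hp : ((PySem.List.enumerate u).map (fun p => p.1)).Pairwise (· < ·) :=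
      List.pairwise_map.mpr (PySem.List.pairwise_lt_enumerate u 0)
    exact hp.imp (fun h => ne_of_lt h)
  have hfold := PySem.Dict.items_foldl_insert_fresh (PySem.List.enumerate u)
      (fun a => a.1) (fun a => a.2) PySem.Dict.empty hfresh hnodup
  rw [hfold]
  simp [PySem.Dict.empty]

-- ===== VERDICT (by name: the statement is the Claim_ definition above) =====
theorem CreateKeyIdx_spec : Claim_equal_CreateKeyIdx := by
  intro keys _
  unfold Spec_CreateKeyIdx CreateKeyIdx_alt
  rw [pvA_eq keys]
  show _ = (_, _)
  rw [show ((PySem.List.enumerate keys).reverse).foldl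
        (fun (d : PySem.Dict String Int) p => d.insert p.2 p.1) PySem.Dict.empty = pvFirstDict keys from rfl]
  rw [pvUnique_eq keys]
  rw [pvEnum_fresh_keyToIdx (PySem.Set.ofList keys) (PySem.Set.nodup_ofList keys),
      pvEnum_fresh_idxToKey (PySem.Set.ofList keys)]
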